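-- pv_equiv track=rewrite | github.com/karyna-volokhatiuk/skyscrapers | skyscrapers.py | check_horizontal_visibility
-- ===== SOURCE A (Python) =====
-- def left_to_right_check(input_line: str, pivot: int):
--     """
--     Check row-wise visibility from left to right.
--     Return True if number of building from the left-most hint is visible looking to the right,
--     False otherwise.
--
--     input_line - representing board row.
--     pivot - number on the left-most hint of the input_line.
--
--     >>> left_to_right_check("412453*", 4)
--     True
--     >>> left_to_right_check("452453*", 5)
--     False
--     """
--     pivot -= 1
--     for index, building in enumerate(input_line[2:-1]):
--         for building_before in input_line[1:index+2]:
--             if building_before >= building: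
--                 pivot += 1
--                 break
--         pivot -= 1
--     if not pivot:
--         return True
--     return False
--
-- def check_not_finished_board(board: list):
--     """
--     Check if skyscraper board is not finished, i.e., '?' present on the game board.
--
--     Return True if finished, False otherwise.
--
--     >>> check_not_finished_board(['***21**', '4?????*', '4?????*', '*?????5', '*?????*', '*?????*', '*2*1***'])
--     False
--     >>> check_not_finished_board(['***21**', '412453*', '423145*', '*543215', '*35214*', '*41532*', '*2*1***'])
--     True
--     >>> check_not_finished_board(['***21**', '412453*', '423145*', '*5?3215', '*35214*', '*41532*', '*2*1***'])
--     False
--     """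
--     for line in board:
--         if '?' in line:
--             return False
--     return True
--
-- def check_uniqueness_in_rows(board: list):
--     """
--     Check buildings of unique height in each row.
--
--     Return True if buildings in a row have unique length, False otherwise.
--
--     >>> check_uniqueness_in_rows(['***21**', '412453*', '423145*', '*543215', '*35214*', '*41532*', '*2*1***'])
--     True
--     >>> check_uniqueness_in_rows(['***21**', '452453*', '423145*', '*543215', '*35214*', '*41532*', '*2*1***'])
--     False
--     >>> check_uniqueness_in_rows(['***21**', '412453*', '423145*', '*553215', '*35214*', '*41532*', '*2*1***'])
--     False
--     """
--     for line in board[1:-1]: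
--         line_list = [i for i in line[1:-1]]
--         if len(set(line_list)) < len(line_list):
--             return False
--     return True
--
-- def check_horizontal_visibility(board: list):
--     """
--     Check row-wise visibility (left-right and vice versa)
--
--     Return True if all horizontal hints are satisfiable,
--      i.e., for line 412453* , hint is 4, and 1245 are the four buildings
--       that could be observed from the hint looking to the right.
--
--     >>> check_horizontal_visibility(['***21**', '412453*', '423145*', '*543215', '*35214*', '*41532*', '*2*1***'])
--     True
--     >>> check_horizontal_visibility(['***21**', '452453*', '423145*', '*543215', '*35214*', '*41532*', '*2*1***'])
--     False
--     >>> check_horizontal_visibility(['***21**', '452413*', '423145*', '*543215', '*35214*', '*41532*', '*2*1***'])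
--     False
--     """
--     if check_not_finished_board(board) and check_uniqueness_in_rows(board):
--         for line in board[1:-1]:
--             if line[0] != "*":
--                 if not left_to_right_check(line, int(line[0])):
--                     return False
--             if line[-1] != "*":
--                 if not left_to_right_check(line[::-1], int(line[-1])):
--                     return False
--         return True
--     return False
-- ===== SOURCE B (Python) =====
-- def count_visible(line: str) -> int:
--     """Number of buildings visible from the left end of the row (hint cell at
--     line[0], buildings line[1:-1]): the first building is always visible, and a
--     later one is visible iff it is taller than everything before it."""
--     count = 1
--     tallest = line[1:2]
--     for building in line[2:-1]:
--         if building > tallest: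
--             count += 1
--             tallest = building
--     return count
--
--
-- def check_horizontal_visibility(board: list):
--     if any('?' in line for line in board):
--         return False
--     inner_rows = board[1:-1]
--     for line in inner_rows:
--         middle = line[1:-1]
--         if len(set(middle)) != len(middle):
--             return False
--     for line in inner_rows:
--         if line[0] != '*' and int(line[0]) != count_visible(line):
--             return False
--         if line[-1] != '*' and int(line[-1]) != count_visible(line[::-1]):
--             return False
--     return True
-- ===== Notes on version B (the rewrite author's own statement) =====
-- stated objective: alternative
-- what changed: Per row, A re-scans the whole prefix for every building with pivot-decrement bookkeeping, while B counts visible buildings in one pass with a running maximum; the screening loops become any()-comprehensions.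
-- outside the precondition, e.g. on check_horizontal_visibility(['***', '9ab', 'xcd', '***']): A returns False, B returns False
import Mathlib
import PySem

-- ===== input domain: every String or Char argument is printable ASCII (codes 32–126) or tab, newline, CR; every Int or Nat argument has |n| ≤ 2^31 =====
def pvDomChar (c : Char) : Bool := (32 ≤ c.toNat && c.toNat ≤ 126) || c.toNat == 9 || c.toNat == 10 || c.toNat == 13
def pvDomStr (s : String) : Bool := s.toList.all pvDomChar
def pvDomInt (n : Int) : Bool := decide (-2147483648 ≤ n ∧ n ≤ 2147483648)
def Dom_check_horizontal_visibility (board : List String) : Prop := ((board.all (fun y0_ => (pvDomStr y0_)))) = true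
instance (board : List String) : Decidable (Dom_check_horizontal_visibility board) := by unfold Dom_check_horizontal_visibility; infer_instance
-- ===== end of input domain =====

-- B replaces A's nested per-building prefix rescan with one running-maximum pass per row; return-value equivalence on Pre_ is proved (no speed claim).


-- ===== PORT A =====

-- the outer 'for index, building in enumerate(input_line[2:-1])' loop; the inner
-- 'for building_before in input_line[1:index+2]: if building_before >= building: pivot += 1; break'
-- followed by the unconditional 'pivot -= 1' nets: pivot unchanged when some earlier building is ≥, else pivot - 1
def ltrLoop (line : List Char) : List Char → Nat → Int → Int
  | [], _, pivot => pivot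
  | building :: rest, index, pivot =>
      let hit := (PySem.List.slice line (some 1) (some ((index : Int) + 2))).any (fun b => building ≤ b)
      ltrLoop line rest (index + 1) (if hit then pivot else pivot - 1)

def left_to_right_check (input_line : List Char) (pivot : Int) : Bool :=
  -- 'pivot -= 1', the loop, then 'if not pivot: return True / return False'
  ltrLoop input_line (PySem.List.slice input_line (some 2) (some (-1))) 0 (pivot - 1) == 0

def check_not_finished_board (board : List String) : Bool :=
  -- '?' in line : single-character membership
  board.all (fun line => !(line.toList.contains '?'))

def check_uniqueness_in_rows (board : List String) : Bool :=
  (PySem.List.slice board (some 1) (some (-1))).all (fun line =>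
    let line_list := PySem.List.slice line.toList (some 1) (some (-1))
    !(decide ((PySem.Set.ofList line_list).length < line_list.length)))

def check_horizontal_visibility (board : List String) : Bool :=
  if check_not_finished_board board && check_uniqueness_in_rows board then
    (PySem.List.slice board (some 1) (some (-1))).all (fun line =>
      let l := line.toList
      let first := (PySem.List.pyGet? l 0).getD '*'      -- line[0]; none = IndexError on an empty line, excluded by Pre_
      let last := (PySem.List.pyGet? l (-1)).getD '*'    -- line[-1]
      -- int(line[0]) / int(line[-1]) : none = ValueError on a non-digit hint character, excluded by Pre_
      (first == '*' || left_to_right_check l ((PySem.Int.ofChars? [first]).getD 0)) &&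
      (last == '*' || left_to_right_check l.reverse ((PySem.Int.ofChars? [last]).getD 0)))  -- line[::-1] is reverse
  else false

-- ===== PORT B =====

-- Python '<' on strings: lexicographic comparison of code points (Source B compares ≤1-character strings)
def pyStrLt : List Char → List Char → Bool
  | [], [] => false
  | [], _ :: _ => true
  | _ :: _, [] => false
  | a :: as, b :: bs => if a < b then true else if b < a then false else pyStrLt as bs

def countVisibleLoop : List Char → Int → List Char → Int
  | [], count, _ => count
  | building :: rest, count, tallest =>
      if pyStrLt tallest [building] then countVisibleLoop rest (count + 1) [building]
      else countVisibleLoop rest count tallest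

def count_visible (line : List Char) : Int :=
  countVisibleLoop (PySem.List.slice line (some 2) (some (-1))) 1
    (PySem.List.slice line (some 1) (some 2))

def check_horizontal_visibility_alt (board : List String) : Bool :=
  if board.any (fun line => line.toList.contains '?') then false
  else
    let inner_rows := PySem.List.slice board (some 1) (some (-1))
    if inner_rows.any (fun line =>
        let middle := PySem.List.slice line.toList (some 1) (some (-1))
        (PySem.Set.ofList middle).length != middle.length) then false
    else inner_rows.all (fun line =>
      let l := line.toList
      let first := (PySem.List.pyGet? l 0).getD '*'      -- line[0]; none = IndexError, outside Pre_
      let last := (PySem.List.pyGet? l (-1)).getD '*'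
      !(first != '*' && ((PySem.Int.ofChars? [first]).getD 0 != count_visible l)) &&
      !(last != '*' && ((PySem.Int.ofChars? [last]).getD 0 != count_visible l.reverse)))

-- ===== PRECONDITION & SPEC =====

-- Pre_ excludes boards on which A raises: boards that pass the '?'- and uniqueness-screens but have an
-- interior line that is empty (IndexError on line[0]) or whose first/last character is neither '*' nor a
-- digit (ValueError in int(line[0])); on a few such boards A still returns False early from a preceding
-- failing line before reaching the bad one — B returns the same False there.
def Pre_check_horizontal_visibility (board : List String) : Prop :=
  ((∀ line ∈ board, '?' ∉ line.toList) ∧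
   (∀ line ∈ (board.drop 1).dropLast, ((line.toList.drop 1).dropLast).Nodup)) →
  ∀ line ∈ (board.drop 1).dropLast,
    line.toList ≠ [] ∧
    (line.toList.headD '*' = '*' ∨ (line.toList.headD '*').isDigit) ∧
    (line.toList.getLastD '*' = '*' ∨ (line.toList.getLastD '*').isDigit)

instance (board : List String) : Decidable (Pre_check_horizontal_visibility board) := by
  unfold Pre_check_horizontal_visibility; infer_instance

def pvWitness_check_horizontal_visibility : List String :=
  ["***21**", "412453*", "423145*", "*543215", "*35214*", "*41532*", "*2*1***"]

def Spec_check_horizontal_visibility (board : List String) (out : Bool) : Prop := out = check_horizontal_visibility_alt board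
instance (board : List String) (out : Bool) : Decidable (Spec_check_horizontal_visibility board out) := by unfold Spec_check_horizontal_visibility; infer_instance

-- ===== CLAIM (what is proved, stated in full; the proofs are below) =====
def Claim_equal_check_horizontal_visibility : Prop := ∀ (board : List String), Dom_check_horizontal_visibility board → Pre_check_horizontal_visibility board → Spec_check_horizontal_visibility board (check_horizontal_visibility board)

-- ===== LEMMAS AND PROOFS =====

theorem sub_beq_zero (a b : Int) : (a - b == 0) = (a == b) := by
  rw [Bool.eq_iff_iff]; simp [beq_iff_eq]; omega

theorem sliceP (l : List Char) (k : Nat) :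
    PySem.List.slice l (some 1) (some ((k : Int) + 2)) = (l.drop 1).take (k + 1) := by
  have h : ((k : Int) + 2) = ((k + 2 : Nat) : Int) := by push_cast; ring
  have h1 : (1 : Int) = ((1 : Nat) : Int) := by norm_num
  rw [h, h1, PySem.List.slice_natCast]
  congr 1

theorem sliceS (l : List Char) : PySem.List.slice l (some 1) (some 2) = (l.drop 1).take 1 := by
  have h1 : (1 : Int) = ((1 : Nat) : Int) := by norm_num
  have h2 : (2 : Int) = ((2 : Nat) : Int) := by norm_num
  rw [h1, h2, PySem.List.slice_natCast]

theorem sliceA (l : List Char) : PySem.List.slice l (some 2) (some (-1)) = (l.drop 2).dropLast := by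
  simp [PySem.List.slice, List.dropLast_eq_take, List.length_drop]
  rcases Nat.le_total l.length 2 with h | h
  · rw [show min 2 l.length = l.length from by omega, List.drop_length, List.drop_eq_nil_of_le h]
    simp
  · rw [show min 2 l.length = 2 from by omega,
        show l.length - 1 - 2 = l.length - 2 - 1 from by omega]

theorem pyStrLt_single (a b : Char) : pyStrLt [a] [b] = decide (a < b) := by
  rcases lt_trichotomy a b with h | h | h
  · simp [pyStrLt, h]
  · subst h; simp [pyStrLt]
  · simp [pyStrLt, h, not_lt.mpr h.le]

-- invariant of the two row loops: A's pivot walk equals pivot + count-so-far minus B's running-max count,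
-- where [m] is B's 'tallest' and m is the maximum of the prefix A's inner loop rescans
theorem ltr_general (cs : List Char) : ∀ (l : List Char) (k : Nat) (pv cnt : Int) (m : Char),
    ((l.drop 2).dropLast).drop k = cs →
    m ∈ (l.drop 1).take (k + 1) →
    (∀ x ∈ (l.drop 1).take (k + 1), x ≤ m) →
    ltrLoop l cs k pv = pv + cnt - countVisibleLoop cs cnt [m] := by
  induction cs with
  | nil => intro l k pv cnt m hdrop hmem hmax; simp [ltrLoop, countVisibleLoop]
  | cons c cs ih =>
    intro l k pv cnt m hdrop hmem hmax
    have hk : k < ((l.drop 2).dropLast).length := by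
      by_contra hge
      rw [List.drop_eq_nil_of_le (by omega)] at hdrop
      exact List.cons_ne_nil _ _ hdrop.symm
    have hsplit := List.drop_eq_getElem_cons hk
    rw [hsplit] at hdrop
    obtain ⟨hc, hcs⟩ : ((l.drop 2).dropLast)[k] = c ∧ ((l.drop 2).dropLast).drop (k + 1) = cs :=
      ⟨by injection hdrop, by injection hdrop⟩
    have hlen2 : ((l.drop 2).dropLast).length = l.length - 2 - 1 := by
      simp [List.length_dropLast, List.length_drop]
    have hk1 : k + 1 < (l.drop 1).length := by
      rw [List.length_drop]; omega
    have hcval : (l.drop 1)[k + 1]'hk1 = c := by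
      rw [← hc, List.getElem_dropLast, List.getElem_drop, List.getElem_drop]
      congr 1; omega
    have htake : (l.drop 1).take (k + 1 + 1) = (l.drop 1).take (k + 1) ++ [c] := by
      rw [List.take_add_one, List.getElem?_eq_getElem hk1, hcval]
      rfl
    have hhit : ((l.drop 1).take (k + 1)).any (fun b => c ≤ b) = decide (c ≤ m) := by
      by_cases h : c ≤ m
      · simp only [h, decide_true]
        exact List.any_eq_true.mpr ⟨m, hmem, by simpa using h⟩
      · simp only [h, decide_false]
        rw [List.any_eq_false]
        intro x hx
        simp only [decide_eq_true_eq]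
        intro hcx
        exact h (le_trans hcx (hmax x hx))
    rw [ltrLoop, countVisibleLoop]
    simp only [sliceP, hhit, pyStrLt_single]
    by_cases h : m < c
    · have hcm : ¬ (c ≤ m) := not_le.mpr h
      simp only [h, hcm, decide_true, decide_false, Bool.false_eq_true, if_false, if_true]
      have := ih l (k + 1) (pv - 1) (cnt + 1) c hcs
        (by rw [htake]; exact List.mem_append_right _ (List.mem_singleton_self c))
        (by rw [htake]; intro x hx
            rcases List.mem_append.mp hx with hx | hx
            · exact le_of_lt (lt_of_le_of_lt (hmax x hx) h)
            · exact le_of_eq (by simpa using hx : x = c))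
      rw [this]; ring
    · have hcm : c ≤ m := not_lt.mp h
      simp only [h, hcm, decide_true, decide_false, Bool.false_eq_true, if_true, if_false]
      exact ih l (k + 1) pv cnt m hcs
        (by rw [htake]; exact List.mem_append_left _ hmem)
        (by rw [htake]; intro x hx
            rcases List.mem_append.mp hx with hx | hx
            · exact hmax x hx
            · exact (by simpa using hx : x = c) ▸ hcm)

-- A's whole row check equals "hint == B's visible-building count", for any row and any hint value
theorem ltr_eq_count (l : List Char) (h : Int) :
    left_to_right_check l h = (h == count_visible l) := by
  unfold left_to_right_check count_visible
  rw [sliceA, sliceS]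
  cases hd : l.drop 1 with
  | nil =>
    have hlen : l.length ≤ 1 := by
      have := congrArg List.length hd; simp at this; omega
    have h2 : (l.drop 2).dropLast = [] := by
      rw [List.drop_eq_nil_of_le (by omega)]; rfl
    rw [h2]
    simp only [ltrLoop, countVisibleLoop]
    exact sub_beq_zero h 1
  | cons m rest =>
    cases hcells : (l.drop 2).dropLast with
    | nil =>
      simp only [ltrLoop, countVisibleLoop]
      exact sub_beq_zero h 1
    | cons c cs =>
      have hmem : m ∈ (l.drop 1).take 1 := by rw [hd]; simp
      have hmax : ∀ x ∈ (l.drop 1).take 1, x ≤ m := by rw [hd]; simp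
      have key := ltr_general (c :: cs) l 0 (h - 1) 1 m (by rw [hcells]; rfl) hmem hmax
      rw [key]
      simp only [List.take_succ_cons]
      rw [show h - 1 + 1 - countVisibleLoop (c :: cs) 1 [m] =
            h - countVisibleLoop (c :: cs) 1 [m] from by ring]
      exact sub_beq_zero h _

-- per-line equality of A's and B's hint tests (pure Bool algebra plus ltr_eq_count)
theorem line_test_eq (line : String) :
    (((PySem.List.pyGet? line.toList 0).getD '*' == '*' ||
        left_to_right_check line.toList ((PySem.Int.ofChars? [(PySem.List.pyGet? line.toList 0).getD '*']).getD 0)) &&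
     ((PySem.List.pyGet? line.toList (-1)).getD '*' == '*' ||
        left_to_right_check line.toList.reverse ((PySem.Int.ofChars? [(PySem.List.pyGet? line.toList (-1)).getD '*']).getD 0))) =
    (!((PySem.List.pyGet? line.toList 0).getD '*' != '*' &&
        ((PySem.Int.ofChars? [(PySem.List.pyGet? line.toList 0).getD '*']).getD 0 != count_visible line.toList)) &&
     !((PySem.List.pyGet? line.toList (-1)).getD '*' != '*' &&
        ((PySem.Int.ofChars? [(PySem.List.pyGet? line.toList (-1)).getD '*']).getD 0 != count_visible line.toList.reverse))) := by
  simp only [ltr_eq_count, bne, Bool.not_and, Bool.not_not]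

-- per-line equality of the two uniqueness tests: with |set(xs)| ≤ |xs|, '<' and '!=' coincide
theorem uniq_test_eq (line : String) :
    (!(decide ((PySem.Set.ofList (PySem.List.slice line.toList (some 1) (some (-1)))).length <
        (PySem.List.slice line.toList (some 1) (some (-1))).length))) =
    !((PySem.Set.ofList (PySem.List.slice line.toList (some 1) (some (-1)))).length !=
        (PySem.List.slice line.toList (some 1) (some (-1))).length) := by
  have hle := PySem.Set.length_ofList_le (xs := PySem.List.slice line.toList (some 1) (some (-1)))
  rw [Bool.eq_iff_iff]
  simp
  omega

-- ===== VERDICT (by name: the statement is the Claim_ definition above) =====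
theorem check_horizontal_visibility_spec : Claim_equal_check_horizontal_visibility := by
  intro board _ _
  unfold Spec_check_horizontal_visibility
  unfold check_horizontal_visibility check_horizontal_visibility_alt
  rw [show check_not_finished_board board = !(board.any (fun line => line.toList.contains '?')) from by
    simp [check_not_finished_board, List.all_eq_not_any_not]]
  rw [show check_uniqueness_in_rows board =
      !((PySem.List.slice board (some 1) (some (-1))).any (fun line =>
        (PySem.Set.ofList (PySem.List.slice line.toList (some 1) (some (-1)))).length !=
          (PySem.List.slice line.toList (some 1) (some (-1))).length)) from by
    unfold check_uniqueness_in_rows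
    rw [List.all_eq_not_any_not]
    congr 1
    exact PySem.List.any_congr_mem (fun line _ => by
      simpa using congrArg (fun b => !b) (uniq_test_eq line))]
  cases h1 : board.any (fun line => line.toList.contains '?') with
  | true => simp
  | false =>
    cases h2 : (PySem.List.slice board (some 1) (some (-1))).any (fun line =>
        (PySem.Set.ofList (PySem.List.slice line.toList (some 1) (some (-1)))).length !=
          (PySem.List.slice line.toList (some 1) (some (-1))).length) with
    | true => simp [h2]
    | false =>
      simp only [h2, Bool.not_false, Bool.true_and, if_true, Bool.false_eq_true, if_false]
      rw [List.all_eq_not_any_not, List.all_eq_not_any_not]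
      congr 1
      exact PySem.List.any_congr_mem (fun line _ => by
        exact congrArg (fun b => !b) (line_test_eq line))
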